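-- pv_equiv track=rewrite | github.com/nxenon/grpc-scan | grpc_utils.py | replace_value_at_path
-- ===== SOURCE A (Python) =====
-- def replace_value_at_path(message, field_path, new_value):
--     """Replace value at the specified field path (escaping included)"""
--
--     def escape_value(val):
--         val = str(val)
--         val = val.replace('\\', '\\\\').replace('"', '\\"')
--         val = val.replace('\n', '\\n').replace('\r', '\\r')
--         return '"{}"'.format(val)
--
--     if not field_path:
--         return message
--
--     lines = message.split('\n')
--     result = []
--     path_stack = []
--
--     for line in lines:
--         stripped = line.lstrip()
--         indent = len(line) - len(stripped)
--
--         while path_stack and indent <= path_stack[-1][0]: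
--             path_stack.pop()
--
--         if ': {' in stripped:
--             field_num = stripped.split(':', 1)[0].strip()
--             path_stack.append((indent, field_num))
--
--             current_path = [p[1] for p in path_stack]
--             if current_path == field_path:
--                 escaped = escape_value(new_value)
--                 new_line = ' ' * indent + field_num + ': {' + escaped + '}'
--                 result.append(new_line)
--                 continue
--
--         result.append(line)
--
--     return '\n'.join(result)
-- ===== SOURCE B (Python) =====
-- def replace_value_at_path(message, field_path, new_value):
--     """Replace value at the specified field path (escaping included)"""
--
--     def escape_value(val):
--         val = str(val)
--         val = val.replace('\\', '\\\\').replace('"', '\\"')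
--         val = val.replace('\n', '\\n').replace('\r', '\\r')
--         return '"{}"'.format(val)
--
--     if not field_path:
--         return message
--
--     lines = message.split('\n')
--
--     # Recursive descent: at each depth, scan the segment for opening lines
--     # (": {" in the stripped line); a block's body is the contiguous run of
--     # following lines with strictly greater indent.
--     def process(segment, depth):
--         out = []
--         i = 0
--         while i < len(segment):
--             line = segment[i]
--             stripped = line.lstrip()
--             indent = len(line) - len(stripped)
--             if ': {' in stripped:
--                 field_num = stripped.split(':', 1)[0].strip()
--                 j = i + 1
--                 while j < len(segment):
--                     nxt = segment[j]
--                     if len(nxt) - len(nxt.lstrip()) <= indent: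
--                         break
--                     j += 1
--                 body = segment[i + 1:j]
--                 if field_num == field_path[depth]:
--                     if depth == len(field_path) - 1:
--                         out.append(' ' * indent + field_num + ': {'
--                                    + escape_value(new_value) + '}')
--                         out.extend(body)
--                     else:
--                         out.append(line)
--                         out.extend(process(body, depth + 1))
--                 else:
--                     out.append(line)
--                     out.extend(body)
--                 i = j
--             else:
--                 out.append(line)
--                 i += 1
--         return out
--
--     return '\n'.join(process(lines, 0))
-- ===== Notes on version B (the rewrite author's own statement) =====
-- stated objective: alternative
-- what changed: Replaced the single linear pass that maintains an explicit indent/field stack (popping on every line) with a recursive descent that splits the message into indentation-delimited blocks and recurses only into blocks whose field number matches the next path segment, copying all other blocks verbatim.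
import Mathlib
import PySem

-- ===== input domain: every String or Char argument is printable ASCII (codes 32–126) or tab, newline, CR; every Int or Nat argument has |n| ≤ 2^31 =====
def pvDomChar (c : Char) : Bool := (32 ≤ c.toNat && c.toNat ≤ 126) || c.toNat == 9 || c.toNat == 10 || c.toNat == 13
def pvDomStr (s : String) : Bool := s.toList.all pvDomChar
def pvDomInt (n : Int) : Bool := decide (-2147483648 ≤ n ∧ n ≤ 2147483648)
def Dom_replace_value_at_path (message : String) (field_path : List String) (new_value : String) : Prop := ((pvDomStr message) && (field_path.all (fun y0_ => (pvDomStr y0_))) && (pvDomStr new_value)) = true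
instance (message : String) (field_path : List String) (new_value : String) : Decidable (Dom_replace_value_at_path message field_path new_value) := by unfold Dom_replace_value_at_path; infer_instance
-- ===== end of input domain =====

-- B replaces A's single stack-maintaining pass by a recursive descent over indentation
-- blocks (objective: alternative decomposition, same asymptotic cost, return value proved equal).

-- shared helpers: both Pythons contain these identical sub-expressions
-- escape_value (identical nested function in A and B)
def pvEsc (val : String) : String :=
  let v1 := PySem.Str.replace val "\\" "\\\\"
  let v2 := PySem.Str.replace v1 "\"" "\\\""
  let v3 := PySem.Str.replace v2 "\n" "\\n"
  let v4 := PySem.Str.replace v3 "\r" "\\r"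
  "\"" ++ v4 ++ "\""

-- len(line) - len(line.lstrip()), as both Pythons compute the indent
def pvIndent (line : String) : Int :=
  PySem.Str.len line - PySem.Str.len (PySem.Str.lstrip line)

-- stripped.split(':', 1)[0].strip()  (the [0] always exists: split returns a nonempty list)
def pvFieldNum (stripped : String) : String :=
  PySem.Str.strip (((PySem.Str.splitMax? stripped ":" 1).getD []).headD "")

-- ' ' * indent + field_num + ': {' + escape_value(new_value) + '}'
-- (indent = len(line) - len(lstrip(line)) ≥ 0, so .toNat is exact)
def pvNewLine (indent : Int) (field_num : String) (nv : String) : String :=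
  String.ofList (List.replicate indent.toNat ' ') ++ field_num ++ ": {" ++ pvEsc nv ++ "}"

-- ===== PORT A =====
-- path_stack kept head-first: the head is Python's path_stack[-1];
-- current_path = [p[1] for p in path_stack] is (stack.map Prod.snd).reverse
def pvPop (idt : Int) : List (Int × String) → List (Int × String)
  | [] => []
  | x :: rest => if idt ≤ x.1 then pvPop idt rest else x :: rest

def pvAStep (fp : List String) (nv : String)
    (st : List String × List (Int × String)) (line : String) :
    List String × List (Int × String) :=
  let stripped := PySem.Str.lstrip line
  let indent := pvIndent line
  let stack := pvPop indent st.2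
  if PySem.Str.isIn ": {" stripped then
    let field_num := pvFieldNum stripped
    let stack2 := (indent, field_num) :: stack
    if (stack2.map Prod.snd).reverse = fp then
      (st.1 ++ [pvNewLine indent field_num nv], stack2)
    else
      (st.1 ++ [line], stack2)
  else
    (st.1 ++ [line], stack)

def replace_value_at_path (message : String) (field_path : List String) (new_value : String) : String :=
  if field_path = [] then message
  else
    let lines := (PySem.Str.split? message "\n").getD []  -- sep "\n" ≠ "": never none
    PySem.Str.join "\n" ((lines.foldl (pvAStep field_path new_value) ([], [])).1)

-- ===== PORT B =====
-- Source B's inner while: gather the contiguous run of following lines with strictly greater indent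
def pvTakeBody (idt : Int) : List String → List String × List String
  | [] => ([], [])
  | l :: ls =>
    if pvIndent l ≤ idt then ([], l :: ls)
    else
      let p := pvTakeBody idt ls
      (l :: p.1, p.2)

theorem pvTakeBody_fst_len (idt : Int) (ls : List String) :
    (pvTakeBody idt ls).1.length ≤ ls.length := by
  induction ls with
  | nil => simp [pvTakeBody]
  | cons l ls ih =>
    simp only [pvTakeBody]
    split
    · simp
    · simpa using Nat.succ_le_succ ih

theorem pvTakeBody_snd_len (idt : Int) (ls : List String) :
    (pvTakeBody idt ls).2.length ≤ ls.length := by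
  induction ls with
  | nil => simp [pvTakeBody]
  | cons l ls ih =>
    simp only [pvTakeBody]
    split
    · simp
    · simpa using Nat.le_succ_of_le ih

def pvProcess (fp : List String) (nv : String) : List String → Nat → List String
  | [], _ => []
  | line :: rest, depth =>
    let stripped := PySem.Str.lstrip line
    let indent := pvIndent line
    if PySem.Str.isIn ": {" stripped then
      let field_num := pvFieldNum stripped
      let p := pvTakeBody indent rest
      if field_num = fp.getD depth "" then
        if depth = fp.length - 1 then
          pvNewLine indent field_num nv :: (p.1 ++ pvProcess fp nv p.2 depth)
        else
          line :: (pvProcess fp nv p.1 (depth + 1) ++ pvProcess fp nv p.2 depth)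
      else
        line :: (p.1 ++ pvProcess fp nv p.2 depth)
    else
      line :: pvProcess fp nv rest depth
termination_by seg _ => seg.length
decreasing_by
  all_goals first
    | exact Nat.lt_succ_of_le (pvTakeBody_fst_len _ _)
    | exact Nat.lt_succ_of_le (pvTakeBody_snd_len _ _)
    | exact Nat.lt_succ_of_le le_rfl

def replace_value_at_path_alt (message : String) (field_path : List String) (new_value : String) : String :=
  if field_path = [] then message
  else
    PySem.Str.join "\n" (pvProcess field_path new_value ((PySem.Str.split? message "\n").getD []) 0)

-- ===== PRECONDITION & SPEC =====
def Spec_replace_value_at_path (message : String) (field_path : List String) (new_value : String) (out : String) : Prop := out = replace_value_at_path_alt message field_path new_value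
instance (message : String) (field_path : List String) (new_value : String) (out : String) : Decidable (Spec_replace_value_at_path message field_path new_value out) := by unfold Spec_replace_value_at_path; infer_instance

-- ===== CLAIM (what is proved, stated in full; the proofs are below) =====
def Claim_equal_replace_value_at_path : Prop := ∀ (message : String) (field_path : List String) (new_value : String), Dom_replace_value_at_path message field_path new_value → Spec_replace_value_at_path message field_path new_value (replace_value_at_path message field_path new_value)

-- ===== LEMMAS AND PROOFS =====

-- A's loop, as output/stack of the fold started from an arbitrary stack
def pvOut (fp : List String) (nv : String) (S : List (Int × String)) (seg : List String) : List String :=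
  (seg.foldl (pvAStep fp nv) ([], S)).1

def pvStk (fp : List String) (nv : String) (S : List (Int × String)) (seg : List String) : List (Int × String) :=
  (seg.foldl (pvAStep fp nv) ([], S)).2

-- "the line's indent is strictly above the stack top" (trivially true for the empty stack)
def pvTop (S : List (Int × String)) (idt : Int) : Prop :=
  match S with | [] => True | x :: _ => x.1 < idt

-- "the stack can never again be extended to match fp"
def pvBad (fp : List String) (S : List (Int × String)) : Prop :=
  (S.map Prod.snd).reverse ≠ fp.take S.length ∨ fp.length ≤ S.length

theorem pvAStep_fst (fp : List String) (nv : String) (res : List String)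
    (S : List (Int × String)) (l : String) :
    pvAStep fp nv (res, S) l =
      (res ++ (pvAStep fp nv ([], S) l).1, (pvAStep fp nv ([], S) l).2) := by
  simp only [pvAStep]
  split
  · split <;> simp
  · simp

theorem pvFoldl_eq (fp : List String) (nv : String) :
    ∀ (seg : List String) (res : List String) (S : List (Int × String)),
      seg.foldl (pvAStep fp nv) (res, S) = (res ++ pvOut fp nv S seg, pvStk fp nv S seg) := by
  intro seg
  induction seg with
  | nil => intro res S; simp [pvOut, pvStk]
  | cons l ls ih =>
    intro res S
    have hO : pvOut fp nv S (l :: ls) =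
        (pvAStep fp nv ([], S) l).1 ++ pvOut fp nv (pvAStep fp nv ([], S) l).2 ls := by
      unfold pvOut
      rw [List.foldl_cons, pvAStep_fst fp nv [] S l,
        ih ([] ++ (pvAStep fp nv ([], S) l).1) (pvAStep fp nv ([], S) l).2]
      simp [pvOut]
    have hS : pvStk fp nv S (l :: ls) = pvStk fp nv (pvAStep fp nv ([], S) l).2 ls := by
      unfold pvStk
      rw [List.foldl_cons, pvAStep_fst fp nv [] S l,
        ih ([] ++ (pvAStep fp nv ([], S) l).1) (pvAStep fp nv ([], S) l).2]
      rfl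
    rw [hO, hS, List.foldl_cons, pvAStep_fst fp nv res S l,
      ih (res ++ (pvAStep fp nv ([], S) l).1) (pvAStep fp nv ([], S) l).2]
    simp

theorem pvOut_cons (fp : List String) (nv : String) (S : List (Int × String)) (l : String) (ls : List String) :
    pvOut fp nv S (l :: ls) =
      (pvAStep fp nv ([], S) l).1 ++ pvOut fp nv (pvAStep fp nv ([], S) l).2 ls := by
  unfold pvOut
  rw [List.foldl_cons, pvAStep_fst fp nv [] S l, pvFoldl_eq]
  simp [pvOut]

theorem pvStk_cons (fp : List String) (nv : String) (S : List (Int × String)) (l : String) (ls : List String) :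
    pvStk fp nv S (l :: ls) = pvStk fp nv (pvAStep fp nv ([], S) l).2 ls := by
  unfold pvStk
  rw [List.foldl_cons, pvAStep_fst fp nv [] S l, pvFoldl_eq]
  rfl

theorem pvOut_append (fp : List String) (nv : String) (S : List (Int × String)) (xs ys : List String) :
    pvOut fp nv S (xs ++ ys) = pvOut fp nv S xs ++ pvOut fp nv (pvStk fp nv S xs) ys := by
  unfold pvOut
  rw [List.foldl_append, pvFoldl_eq fp nv xs [] S, pvFoldl_eq fp nv ys]
  simp [pvOut, pvStk]

-- step characterizations
theorem pvAStep_open_hit (fp : List String) (nv : String) (S : List (Int × String)) (l : String)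
    (hin : PySem.Str.isIn ": {" (PySem.Str.lstrip l) = true)
    (hpath : ((((pvIndent l, pvFieldNum (PySem.Str.lstrip l)) :: pvPop (pvIndent l) S).map Prod.snd).reverse = fp)) :
    pvAStep fp nv ([], S) l =
      ([pvNewLine (pvIndent l) (pvFieldNum (PySem.Str.lstrip l)) nv],
       (pvIndent l, pvFieldNum (PySem.Str.lstrip l)) :: pvPop (pvIndent l) S) := by
  simp only [pvAStep]
  rw [if_pos hin, if_pos hpath]
  simp

theorem pvAStep_open_miss (fp : List String) (nv : String) (S : List (Int × String)) (l : String)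
    (hin : PySem.Str.isIn ": {" (PySem.Str.lstrip l) = true)
    (hpath : ¬ ((((pvIndent l, pvFieldNum (PySem.Str.lstrip l)) :: pvPop (pvIndent l) S).map Prod.snd).reverse = fp)) :
    pvAStep fp nv ([], S) l =
      ([l], (pvIndent l, pvFieldNum (PySem.Str.lstrip l)) :: pvPop (pvIndent l) S) := by
  simp only [pvAStep]
  rw [if_pos hin, if_neg hpath]
  simp

theorem pvAStep_plain (fp : List String) (nv : String) (S : List (Int × String)) (l : String)
    (hin : PySem.Str.isIn ": {" (PySem.Str.lstrip l) = false) :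
    pvAStep fp nv ([], S) l = ([l], pvPop (pvIndent l) S) := by
  simp only [pvAStep]
  rw [if_neg (show ¬ (PySem.Str.isIn ": {" (PySem.Str.lstrip l) = true) by rw [hin]; simp)]
  simp

theorem pvAStep_congr (fp : List String) (nv : String) (S S' : List (Int × String)) (l : String)
    (h : pvPop (pvIndent l) S = pvPop (pvIndent l) S') :
    pvAStep fp nv ([], S) l = pvAStep fp nv ([], S') l := by
  simp only [pvAStep, h]

-- pvPop facts
theorem pvPop_of_top (idt : Int) (S : List (Int × String)) (h : pvTop S idt) :
    pvPop idt S = S := by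
  cases S with
  | nil => rfl
  | cons x rest =>
    simp only [pvTop] at h
    simp [pvPop, not_le.mpr h]

theorem pvPop_append_of_top (idt : Int) (T S : List (Int × String)) (h : pvTop S idt) :
    pvPop idt (T ++ S) = pvPop idt T ++ S := by
  induction T with
  | nil => simpa [pvPop] using pvPop_of_top idt S h
  | cons x T ih =>
    simp only [List.cons_append, pvPop]
    split <;> simp [ih]

theorem pvPop_all (idt : Int) (T S : List (Int × String)) (h : ∀ x ∈ T, idt ≤ x.1) :
    pvPop idt (T ++ S) = pvPop idt S := by
  induction T with
  | nil => rfl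
  | cons x T ih =>
    simp only [List.cons_append, pvPop, if_pos (h x (by simp))]
    exact ih (fun y hy => h y (by simp [hy]))

theorem pvPop_subset (idt : Int) (T : List (Int × String)) (x : Int × String)
    (h : x ∈ pvPop idt T) : x ∈ T := by
  induction T with
  | nil => simp [pvPop] at h
  | cons y T ih =>
    simp only [pvPop] at h
    split at h
    · exact List.mem_cons_of_mem _ (ih h)
    · exact h

-- stack shape invariant: processing lines that all sit strictly above S's top
-- leaves S as an untouched suffix of the stack, under new entries carrying those lines' indents
theorem pvStk_shape (fp : List String) (nv : String) :
    ∀ (seg : List String) (T S : List (Int × String)),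
      (∀ l ∈ seg, pvTop S (pvIndent l)) →
      ∃ T', pvStk fp nv (T ++ S) seg = T' ++ S ∧
        ∀ x ∈ T', x ∈ T ∨ ∃ l ∈ seg, x.1 = pvIndent l := by
  intro seg
  induction seg with
  | nil => intro T S _; exact ⟨T, rfl, fun x hx => Or.inl hx⟩
  | cons l ls ih =>
    intro T S hseg
    have htop : pvTop S (pvIndent l) := hseg l (by simp)
    have hpop : pvPop (pvIndent l) (T ++ S) = pvPop (pvIndent l) T ++ S :=
      pvPop_append_of_top _ _ _ htop
    rw [pvStk_cons]
    by_cases hin : PySem.Str.isIn ": {" (PySem.Str.lstrip l) = true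
    · have hsnd : (pvAStep fp nv ([], T ++ S) l).2 =
          ((pvIndent l, pvFieldNum (PySem.Str.lstrip l)) :: pvPop (pvIndent l) T) ++ S := by
        by_cases hpath : ((((pvIndent l, pvFieldNum (PySem.Str.lstrip l)) :: pvPop (pvIndent l) (T ++ S)).map Prod.snd).reverse = fp)
        · rw [pvAStep_open_hit fp nv _ l hin hpath]
          simp [hpop]
        · rw [pvAStep_open_miss fp nv _ l hin hpath]
          simp [hpop]
      rw [hsnd]
      obtain ⟨T', hT', hmem⟩ := ih ((pvIndent l, pvFieldNum (PySem.Str.lstrip l)) :: pvPop (pvIndent l) T) S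
        (fun x hx => hseg x (by simp [hx]))
      refine ⟨T', hT', fun x hx => ?_⟩
      rcases hmem x hx with h | h
      · rcases List.mem_cons.mp h with h | h
        · exact Or.inr ⟨l, by simp, by rw [h]⟩
        · exact Or.inl (pvPop_subset _ _ _ h)
      · obtain ⟨m, hm, hme⟩ := h
        exact Or.inr ⟨m, by simp [hm], hme⟩
    · rw [pvAStep_plain fp nv _ l (by simpa using hin), hpop]
      obtain ⟨T', hT', hmem⟩ := ih (pvPop (pvIndent l) T) S (fun x hx => hseg x (by simp [hx]))
      refine ⟨T', hT', fun x hx => ?_⟩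
      rcases hmem x hx with h | h
      · exact Or.inl (pvPop_subset _ _ _ h)
      · obtain ⟨m, hm, hme⟩ := h
        exact Or.inr ⟨m, by simp [hm], hme⟩

theorem pvBad_ne (fp : List String) (S T : List (Int × String))
    (hbad : pvBad fp S) (hT : T ≠ []) :
    (((T ++ S).map Prod.snd).reverse) ≠ fp := by
  intro heq
  have hlen : S.length + T.length = fp.length := by
    have := congrArg List.length heq
    simp at this
    omega
  rcases hbad with hbad | hbad
  · apply hbad
    have h2 : (S.map Prod.snd).reverse ++ (T.map Prod.snd).reverse = fp := by
      simpa [List.reverse_append] using heq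
    rw [← h2, List.take_append_of_le_length (by simp),
      show S.length = ((S.map Prod.snd).reverse).length from by simp, List.take_length]
  · have : 1 ≤ T.length := by
      cases T with
      | nil => exact absurd rfl hT
      | cons _ _ => simp
    omega

-- the unchanged lemma: once the stack below can never extend to fp, every line is copied verbatim
theorem pvUnchanged (fp : List String) (nv : String) :
    ∀ (seg : List String) (T S : List (Int × String)),
      pvBad fp S → (∀ l ∈ seg, pvTop S (pvIndent l)) →
      pvOut fp nv (T ++ S) seg = seg := by
  intro seg
  induction seg with
  | nil => intro T S _ _; simp [pvOut]
  | cons l ls ih =>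
    intro T S hbad hseg
    have htop : pvTop S (pvIndent l) := hseg l (by simp)
    have hpop : pvPop (pvIndent l) (T ++ S) = pvPop (pvIndent l) T ++ S :=
      pvPop_append_of_top _ _ _ htop
    rw [pvOut_cons]
    by_cases hin : PySem.Str.isIn ": {" (PySem.Str.lstrip l) = true
    · have hpath : ¬ ((((pvIndent l, pvFieldNum (PySem.Str.lstrip l)) :: pvPop (pvIndent l) (T ++ S)).map Prod.snd).reverse = fp) := by
        rw [hpop]
        exact pvBad_ne fp S ((pvIndent l, pvFieldNum (PySem.Str.lstrip l)) :: pvPop (pvIndent l) T) hbad (by simp)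
      rw [pvAStep_open_miss fp nv _ l hin hpath]
      simp only [hpop]
      have h3 := ih ((pvIndent l, pvFieldNum (PySem.Str.lstrip l)) :: pvPop (pvIndent l) T) S hbad
        (fun x hx => hseg x (by simp [hx]))
      simp only [List.cons_append] at h3
      rw [h3]
      simp
    · rw [pvAStep_plain fp nv _ l (by simpa using hin), hpop]
      rw [ih _ S hbad (fun x hx => hseg x (by simp [hx]))]
      simp

-- pvTakeBody facts
theorem pvTakeBody_append (idt : Int) (ls : List String) :
    (pvTakeBody idt ls).1 ++ (pvTakeBody idt ls).2 = ls := by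
  induction ls with
  | nil => rfl
  | cons l ls ih =>
    simp only [pvTakeBody]
    split
    · simp
    · simpa using ih

theorem pvTakeBody_mem (idt : Int) (ls : List String) (b : String)
    (hb : b ∈ (pvTakeBody idt ls).1) : idt < pvIndent b := by
  induction ls with
  | nil => simp [pvTakeBody] at hb
  | cons l ls ih =>
    simp only [pvTakeBody] at hb
    split at hb
    · simp at hb
    · next h =>
      rcases List.mem_cons.mp hb with hb | hb
      · subst hb; omega
      · exact ih hb

theorem pvTakeBody_head (idt : Int) (ls : List String) (r : String) (rs : List String)
    (h : (pvTakeBody idt ls).2 = r :: rs) : pvIndent r ≤ idt := by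
  induction ls with
  | nil => simp [pvTakeBody] at h
  | cons l ls ih =>
    simp only [pvTakeBody] at h
    split at h
    · next hle =>
      simp at h
      rw [← h.1]
      exact hle
    · exact ih h

-- path arithmetic
theorem pvTake_succ (fp : List String) (d : Nat) (hd : d < fp.length) :
    fp.take (d + 1) = fp.take d ++ [fp.getD d ""] := by
  rw [List.take_add_one]
  simp [List.getElem?_eq_getElem hd, List.getD_eq_getElem?_getD]

theorem pvFull_iff (fp : List String) (f : String) (d : Nat) (hd : d < fp.length) :
    fp.take d ++ [f] = fp ↔ (f = fp.getD d "" ∧ d + 1 = fp.length) := by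
  constructor
  · intro h
    have hlen : d + 1 = fp.length := by
      have := congrArg List.length h
      simp [Nat.min_eq_left (Nat.le_of_lt hd)] at this
      omega
    have hfp2 : fp.take d ++ [fp.getD d ""] = fp := by
      rw [← pvTake_succ fp d hd, hlen, List.take_length]
    have h3 : fp.take d ++ [f] = fp.take d ++ [fp.getD d ""] := h.trans hfp2.symm
    have h4 := List.append_cancel_left h3
    exact ⟨by simpa using h4, hlen⟩
  · rintro ⟨hf, hlen⟩
    rw [hf, ← pvTake_succ fp d hd, hlen, List.take_length]

-- the matching lemma: A's loop from a stack spelling fp.take d computes B's pvProcess at depth d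
theorem pvMatch (fp : List String) (nv : String) :
    ∀ (n : Nat) (seg : List String), seg.length ≤ n →
      ∀ (S : List (Int × String)),
        (S.map Prod.snd).reverse = fp.take S.length →
        S.length < fp.length →
        (∀ l ∈ seg, pvTop S (pvIndent l)) →
        pvOut fp nv S seg = pvProcess fp nv seg S.length := by
  intro n
  induction n with
  | zero =>
    intro seg hlen S _ _ _
    rw [List.length_eq_zero_iff.mp (Nat.le_zero.mp hlen)]
    simp [pvOut, pvProcess]
  | succ n ih =>
    intro seg hlen S hmap hdlt hseg
    cases seg with
    | nil => simp [pvOut, pvProcess]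
    | cons l ls =>
      have hlen' : ls.length ≤ n := by simpa using hlen
      have htop : pvTop S (pvIndent l) := hseg l (by simp)
      have hpop : pvPop (pvIndent l) S = S := pvPop_of_top _ _ htop
      by_cases hin : PySem.Str.isIn ": {" (PySem.Str.lstrip l) = true
      · -- opener line
        have hsplit : (pvTakeBody (pvIndent l) ls).1 ++ (pvTakeBody (pvIndent l) ls).2 = ls :=
          pvTakeBody_append (pvIndent l) ls
        have hbodylen : (pvTakeBody (pvIndent l) ls).1.length ≤ n :=
          le_trans (pvTakeBody_fst_len _ _) hlen'
        have hrestlen : (pvTakeBody (pvIndent l) ls).2.length ≤ n :=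
          le_trans (pvTakeBody_snd_len _ _) hlen'
        have hresttop : ∀ x ∈ (pvTakeBody (pvIndent l) ls).2, pvTop S (pvIndent x) := by
          intro x hx
          refine hseg x (List.mem_cons_of_mem _ ?_)
          rw [← hsplit]
          exact List.mem_append_right _ hx
        have hbodytop : ∀ b ∈ (pvTakeBody (pvIndent l) ls).1,
            pvTop ((pvIndent l, pvFieldNum (PySem.Str.lstrip l)) :: S) (pvIndent b) := by
          intro b hb
          exact pvTakeBody_mem (pvIndent l) ls b hb
        -- after the body, the stack pops back to S on the first line of the remainder
        have hrest_out :
            pvOut fp nv (pvStk fp nv ((pvIndent l, pvFieldNum (PySem.Str.lstrip l)) :: S) (pvTakeBody (pvIndent l) ls).1) (pvTakeBody (pvIndent l) ls).2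
              = pvOut fp nv S (pvTakeBody (pvIndent l) ls).2 := by
          obtain ⟨T', hT', hTmem⟩ := pvStk_shape fp nv (pvTakeBody (pvIndent l) ls).1 []
            ((pvIndent l, pvFieldNum (PySem.Str.lstrip l)) :: S) hbodytop
          simp only [List.nil_append] at hT'
          rw [hT']
          cases hre : (pvTakeBody (pvIndent l) ls).2 with
          | nil => simp [pvOut]
          | cons r rs =>
            have hrle : pvIndent r ≤ pvIndent l := pvTakeBody_head (pvIndent l) ls r rs hre
            have hstep : pvAStep fp nv ([], T' ++ (pvIndent l, pvFieldNum (PySem.Str.lstrip l)) :: S) r = pvAStep fp nv ([], S) r := by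
              apply pvAStep_congr
              have h1 : pvPop (pvIndent r) ((T' ++ [(pvIndent l, pvFieldNum (PySem.Str.lstrip l))]) ++ S) = pvPop (pvIndent r) S := by
                apply pvPop_all
                intro x hx
                rcases List.mem_append.mp hx with hx | hx
                · rcases hTmem x hx with h | h
                  · simp at h
                  · obtain ⟨m, hm, hme⟩ := h
                    have := pvTakeBody_mem (pvIndent l) ls m hm
                    omega
                · simp at hx
                  rw [hx]
                  exact hrle
              simpa using h1
            rw [pvOut_cons, pvOut_cons, hstep]
        have hrest_tail : pvOut fp nv S (pvTakeBody (pvIndent l) ls).2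
            = pvProcess fp nv (pvTakeBody (pvIndent l) ls).2 S.length :=
          ih _ hrestlen S hmap hdlt hresttop
        have hOls : pvOut fp nv ((pvIndent l, pvFieldNum (PySem.Str.lstrip l)) :: S) ls
            = pvOut fp nv ((pvIndent l, pvFieldNum (PySem.Str.lstrip l)) :: S) (pvTakeBody (pvIndent l) ls).1
              ++ pvProcess fp nv (pvTakeBody (pvIndent l) ls).2 S.length := by
          conv_lhs => rw [← hsplit]
          rw [pvOut_append, hrest_out, hrest_tail]
        by_cases hhit : pvFieldNum (PySem.Str.lstrip l) = fp.getD S.length ""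
        · by_cases hfin : S.length + 1 = fp.length
          · -- final segment matched: A replaces the line; the body can never match again
            have hpath : ((((pvIndent l, pvFieldNum (PySem.Str.lstrip l)) :: pvPop (pvIndent l) S).map Prod.snd).reverse = fp) := by
              rw [hpop]
              simp only [List.map_cons, List.reverse_cons, hmap]
              exact (pvFull_iff fp _ S.length hdlt).mpr ⟨hhit, hfin⟩
            have hbad2 : pvBad fp ((pvIndent l, pvFieldNum (PySem.Str.lstrip l)) :: S) :=
              Or.inr (by simp; omega)
            have hbodyout : pvOut fp nv ((pvIndent l, pvFieldNum (PySem.Str.lstrip l)) :: S) (pvTakeBody (pvIndent l) ls).1 = (pvTakeBody (pvIndent l) ls).1 := by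
              have h5 := pvUnchanged fp nv (pvTakeBody (pvIndent l) ls).1 []
                ((pvIndent l, pvFieldNum (PySem.Str.lstrip l)) :: S) hbad2 hbodytop
              simpa using h5
            have hB : pvProcess fp nv (l :: ls) S.length =
                pvNewLine (pvIndent l) (pvFieldNum (PySem.Str.lstrip l)) nv ::
                  ((pvTakeBody (pvIndent l) ls).1 ++ pvProcess fp nv (pvTakeBody (pvIndent l) ls).2 S.length) := by
              simp only [pvProcess]
              rw [if_pos hin, if_pos hhit, if_pos (by omega)]
            rw [pvOut_cons, pvAStep_open_hit fp nv S l hin hpath]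
            dsimp only
            rw [hpop, hOls, hbodyout, hB]
            simp
          · -- matched a non-final segment: recurse into the body at depth + 1
            have hpath : ¬ ((((pvIndent l, pvFieldNum (PySem.Str.lstrip l)) :: pvPop (pvIndent l) S).map Prod.snd).reverse = fp) := by
              rw [hpop]
              simp only [List.map_cons, List.reverse_cons, hmap]
              intro hcon
              exact hfin ((pvFull_iff fp _ S.length hdlt).mp hcon).2
            have hS2map : (((pvIndent l, pvFieldNum (PySem.Str.lstrip l)) :: S).map Prod.snd).reverse
                = fp.take ((pvIndent l, pvFieldNum (PySem.Str.lstrip l)) :: S).length := by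
              simp only [List.map_cons, List.reverse_cons, hmap, List.length_cons]
              rw [pvTake_succ fp S.length hdlt, hhit]
            have hbodyout : pvOut fp nv ((pvIndent l, pvFieldNum (PySem.Str.lstrip l)) :: S) (pvTakeBody (pvIndent l) ls).1
                = pvProcess fp nv (pvTakeBody (pvIndent l) ls).1 (S.length + 1) := by
              have h6 := ih _ hbodylen ((pvIndent l, pvFieldNum (PySem.Str.lstrip l)) :: S)
                hS2map (by simp; omega) hbodytop
              simpa using h6
            have hB : pvProcess fp nv (l :: ls) S.length =
                l :: (pvProcess fp nv (pvTakeBody (pvIndent l) ls).1 (S.length + 1)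
                  ++ pvProcess fp nv (pvTakeBody (pvIndent l) ls).2 S.length) := by
              simp only [pvProcess]
              rw [if_pos hin, if_pos hhit, if_neg (by omega)]
            rw [pvOut_cons, pvAStep_open_miss fp nv S l hin hpath]
            dsimp only
            rw [hpop, hOls, hbodyout, hB]
            simp
        · -- field number does not match: the whole block is copied verbatim
          have hpath : ¬ ((((pvIndent l, pvFieldNum (PySem.Str.lstrip l)) :: pvPop (pvIndent l) S).map Prod.snd).reverse = fp) := by
            rw [hpop]
            simp only [List.map_cons, List.reverse_cons, hmap]
            intro hcon
            exact hhit ((pvFull_iff fp _ S.length hdlt).mp hcon).1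
          have hbad2 : pvBad fp ((pvIndent l, pvFieldNum (PySem.Str.lstrip l)) :: S) := by
            left
            simp only [List.map_cons, List.reverse_cons, hmap, List.length_cons]
            rw [pvTake_succ fp S.length hdlt]
            intro hcon
            exact hhit (by simpa using List.append_cancel_left hcon)
          have hbodyout : pvOut fp nv ((pvIndent l, pvFieldNum (PySem.Str.lstrip l)) :: S) (pvTakeBody (pvIndent l) ls).1 = (pvTakeBody (pvIndent l) ls).1 := by
            have h5 := pvUnchanged fp nv (pvTakeBody (pvIndent l) ls).1 []
              ((pvIndent l, pvFieldNum (PySem.Str.lstrip l)) :: S) hbad2 hbodytop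
            simpa using h5
          have hB : pvProcess fp nv (l :: ls) S.length =
              l :: ((pvTakeBody (pvIndent l) ls).1 ++ pvProcess fp nv (pvTakeBody (pvIndent l) ls).2 S.length) := by
            simp only [pvProcess]
            rw [if_pos hin, if_neg hhit]
          rw [pvOut_cons, pvAStep_open_miss fp nv S l hin hpath]
          dsimp only
          rw [hpop, hOls, hbodyout, hB]
          simp
      · -- ordinary line: copied on both sides, stack/depth unchanged
        have hB : pvProcess fp nv (l :: ls) S.length = l :: pvProcess fp nv ls S.length := by
          simp only [pvProcess]
          rw [if_neg hin]
        rw [pvOut_cons, pvAStep_plain fp nv S l (by simpa using hin)]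
        dsimp only
        rw [hpop, hB, ih ls hlen' S hmap hdlt (fun x hx => hseg x (by simp [hx]))]
        simp

-- ===== VERDICT (by name: the statement is the Claim_ definition above) =====
theorem replace_value_at_path_spec : Claim_equal_replace_value_at_path := by
  intro message fp nv _
  unfold Spec_replace_value_at_path replace_value_at_path replace_value_at_path_alt
  by_cases hfp : fp = []
  · simp [hfp]
  · rw [if_neg hfp, if_neg hfp]
    have h := pvMatch fp nv ((PySem.Str.split? message "\n").getD []).length
      ((PySem.Str.split? message "\n").getD []) le_rfl []
      (by simp) (by cases fp with | nil => exact absurd rfl hfp | cons _ _ => simp)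
      (by intro l _; trivial)
    simp only [pvOut, List.length_nil] at h
    exact congrArg (PySem.Str.join "\n") h
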